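-- pv_equiv track=rewrite | github.com/kaushal40/Python-Data-Structure | List_or_Array/replace_even_numbers_by_two_of_same.py | replce_even_number_by_two
-- ===== SOURCE A (Python) =====
-- def replce_even_number_by_two(array_data):
--     if array_data is None or len(array_data) <=0:
--         return None
--     # store the secon pointer location
--     second_pointer = len(array_data) - 1
--
--     # traverse array from reverse and if it is None skip or even skip, if even add at end
--     for i in reversed(range(len(array_data))):
--         if array_data[i] is None or array_data[i] % 2 != 0:
--             pass
--         else:
--             array_data[second_pointer] = array_data[i]
--             second_pointer-=1
--         i-=1
--
--     return array_data
-- ===== SOURCE B (Python) =====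
-- def replce_even_number_by_two(array_data):
--     if array_data is None or len(array_data) <= 0:
--         return None
--     evens = [x for x in array_data if x is not None and x % 2 == 0]
--     array_data[len(array_data) - len(evens):] = evens
--     return array_data
-- ===== Notes on version B (the rewrite author's own statement) =====
-- stated objective: simpler
-- what changed: Replaces the reverse two-pointer in-place rewrite with a single forward gather of the even elements followed by one tail slice assignment.
import Mathlib
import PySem

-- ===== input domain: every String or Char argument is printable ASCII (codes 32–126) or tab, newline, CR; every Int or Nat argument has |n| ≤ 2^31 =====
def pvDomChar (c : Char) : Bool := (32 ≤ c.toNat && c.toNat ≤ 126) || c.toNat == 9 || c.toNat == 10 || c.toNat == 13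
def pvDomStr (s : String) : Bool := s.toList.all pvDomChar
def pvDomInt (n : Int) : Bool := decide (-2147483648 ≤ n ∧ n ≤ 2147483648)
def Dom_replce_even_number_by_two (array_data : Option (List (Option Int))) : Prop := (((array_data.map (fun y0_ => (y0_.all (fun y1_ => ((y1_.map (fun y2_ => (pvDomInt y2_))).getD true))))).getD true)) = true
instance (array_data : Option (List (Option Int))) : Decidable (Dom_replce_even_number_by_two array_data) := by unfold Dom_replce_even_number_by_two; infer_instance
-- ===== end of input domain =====

-- B gathers the even elements in one forward pass and overwrites only the tail with one
-- slice assignment, instead of A's reverse two-pointer in-place rewrite; equivalence is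
-- about the return value (both also leave the argument list in the same final state).

-- ===== PORT A =====
-- one loop iteration of A's reverse traversal: state = (array_data, second_pointer)
-- (array_data[i] is always in range here, so total pyGetD is exact)
def pvAStep (st : List (Option Int) × Int) (i : Int) : List (Option Int) × Int :=
  match PySem.List.pyGetD st.1 i none with
  | none => st
  | some x =>
    if PySem.Int.mod x 2 ≠ 0 then st
    else (PySem.List.pySetD st.1 st.2 (some x), st.2 - 1)

def replce_even_number_by_two (array_data : Option (List (Option Int))) : Option (List (Option Int)) :=
  match array_data with
  | none => none
  | some l =>
    if PySem.List.len l ≤ 0 then none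
    else
      some (((PySem.List.pyRange 0 (PySem.List.len l) 1).reverse.foldl
              pvAStep (l, PySem.List.len l - 1)).1)

-- ===== PORT B =====
-- 'x is not None and x % 2 == 0'
def pvIsEven (x : Option Int) : Bool :=
  match x with
  | none => false
  | some v => PySem.Int.mod v 2 == 0

def replce_even_number_by_two_alt (array_data : Option (List (Option Int))) : Option (List (Option Int)) :=
  match array_data with
  | none => none
  | some l =>
    if PySem.List.len l ≤ 0 then none
    else
      let evens := l.filter pvIsEven
      -- array_data[len(array_data) - len(evens):] = evens
      some (l.take (l.length - evens.length) ++ evens)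

-- ===== PRECONDITION & SPEC =====
def Spec_replce_even_number_by_two (array_data : Option (List (Option Int))) (out : Option (List (Option Int))) : Prop := out = replce_even_number_by_two_alt array_data
instance (array_data : Option (List (Option Int))) (out : Option (List (Option Int))) : Decidable (Spec_replce_even_number_by_two array_data out) := by unfold Spec_replce_even_number_by_two; infer_instance

-- ===== CLAIM (what is proved, stated in full; the proofs are below) =====
def Claim_equal_replce_even_number_by_two : Prop := ∀ (array_data : Option (List (Option Int))), Dom_replce_even_number_by_two array_data → Spec_replce_even_number_by_two array_data (replce_even_number_by_two array_data)

-- ===== LEMMAS AND PROOFS =====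

-- reversed(range(n)) as an explicit descending list of Ints
def pvRevRange : Nat → List Int
  | 0 => []
  | m+1 => (m : Int) :: pvRevRange m

theorem pvRevRange_eq (n : Nat) : (PySem.List.pyRange 0 (n : Int) 1).reverse = pvRevRange n := by
  induction n with
  | zero => decide
  | succ n ih =>
    have : ((n + 1 : Nat) : Int) = (n : Int) + 1 := by push_cast; ring
    rw [this, PySem.List.pyRange_one_succ_right (by positivity), List.reverse_append]
    simp [pvRevRange, ih]

-- loop invariant: after A has processed indices l.length-1 .. m, the state is
-- (l.take (l.length - k) ++ evens of (l.drop m), l.length - 1 - k) with k that evens count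
theorem pvLoop (l : List (Option Int)) (m : Nat) (hm : m ≤ l.length) :
    (pvRevRange m).foldl pvAStep
      (l.take (l.length - ((l.drop m).filter pvIsEven).length) ++ (l.drop m).filter pvIsEven,
       (l.length : Int) - 1 - ((l.drop m).filter pvIsEven).length)
    = (l.take (l.length - (l.filter pvIsEven).length) ++ l.filter pvIsEven,
       (l.length : Int) - 1 - (l.filter pvIsEven).length) := by
  induction m with
  | zero => simp [pvRevRange]
  | succ m ih =>
    have h : m < l.length := hm
    have hdrop : l.drop m = l[m] :: l.drop (m+1) := List.drop_eq_getElem_cons h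
    have hk' : ((l.drop (m+1)).filter pvIsEven).length ≤ l.length - (m+1) := by
      have := List.length_filter_le pvIsEven (l.drop (m+1))
      simpa using this
    set k' := ((l.drop (m+1)).filter pvIsEven).length with hk'def
    have hmk : m < l.length - k' := by omega
    rw [show pvRevRange (m+1) = (m : Int) :: pvRevRange m from rfl, List.foldl_cons]
    have hstep : pvAStep
        (l.take (l.length - k') ++ (l.drop (m+1)).filter pvIsEven, (l.length : Int) - 1 - k') (m : Int)
      = (l.take (l.length - ((l.drop m).filter pvIsEven).length) ++ (l.drop m).filter pvIsEven,
         (l.length : Int) - 1 - ((l.drop m).filter pvIsEven).length) := by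
      have hget : PySem.List.pyGetD
          (l.take (l.length - k') ++ (l.drop (m+1)).filter pvIsEven) (m : Int) none = l[m] := by
        rw [PySem.List.pyGetD_natCast]
        rw [List.getD_eq_getElem?_getD, List.getElem?_append_left (by simpa using hmk),
            List.getElem?_take_of_lt hmk]
        simp [List.getElem?_eq_getElem h]
      unfold pvAStep
      rw [hget, hdrop]
      cases hv : l[m] with
      | none =>
        simp only [List.filter_cons, pvIsEven, if_false, Bool.false_eq_true]
        rfl
      | some x =>
        by_cases he : PySem.Int.mod x 2 = 0
        · simp only [he, ne_eq, not_true_eq_false, if_false, List.filter_cons]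
          have hpe : pvIsEven (some x) = true := by
            rw [show pvIsEven (some x) = (PySem.Int.mod x 2 == 0) from rfl, he]; rfl
          simp only [hpe, if_true]
          have hsp : (0:Int) ≤ (l.length : Int) - 1 - k' := by omega
          rw [PySem.List.pySetD_of_nonneg _ _ hsp]
          have htn : ((l.length : Int) - 1 - k').toNat = l.length - 1 - k' := by omega
          rw [htn]
          have hlt : l.length - 1 - k' < (l.take (l.length - k') ++ (l.drop (m+1)).filter pvIsEven).length := by
            simp; omega
          rw [List.set_eq_take_cons_drop _ hlt]
          have hlen1 : (l.take (l.length - k')).length = l.length - k' := by simp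
          have e1 : ((l.take (l.length - k') ++ (l.drop (m+1)).filter pvIsEven).take (l.length - 1 - k'))
              = l.take (l.length - 1 - k') := by
            rw [List.take_append_of_le_length (by omega), List.take_take]
            congr 1; omega
          have e2 : ((l.take (l.length - k') ++ (l.drop (m+1)).filter pvIsEven).drop (l.length - 1 - k' + 1))
              = (l.drop (m+1)).filter pvIsEven := by
            rw [show l.length - 1 - k' + 1 = (l.take (l.length - k')).length from by omega,
                List.drop_left]
          rw [e1, e2]
          simp only [List.length_cons, Prod.mk.injEq]
          constructor
          · rw [show l.length - (k' + 1) = l.length - 1 - k' from by omega]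
          · push_cast
            omega
        · have hme : PySem.Int.mod x 2 = x % 2 := PySem.Int.mod_eq_emod_of_pos (by norm_num)
          have h1 : x % 2 = 1 := by rw [hme] at he; omega
          have hpe : pvIsEven (some x) = false := by
            rw [show pvIsEven (some x) = (PySem.Int.mod x 2 == 0) from rfl]
            exact beq_eq_false_iff_ne.mpr he
          simp only [List.filter_cons, hpe, Bool.false_eq_true, if_false, ne_eq, hme, h1,
            one_ne_zero, not_false_eq_true, if_true]
          rfl
    rw [hstep]
    exact ih (le_of_lt h)

-- ===== VERDICT (by name: the statement is the Claim_ definition above) =====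
theorem replce_even_number_by_two_spec : Claim_equal_replce_even_number_by_two := by
  intro ad hdom
  unfold Spec_replce_even_number_by_two replce_even_number_by_two replce_even_number_by_two_alt
  cases ad with
  | none => rfl
  | some l =>
    by_cases hl : PySem.List.len l ≤ 0
    · have hnil : l = [] := by
        rw [PySem.List.len_eq] at hl
        cases l with
        | nil => rfl
        | cons a t => simp at hl; omega
      simp [hnil]
    · simp only [hl, if_false]
      have h0 := pvLoop l l.length le_rfl
      simp only [List.drop_length, List.filter_nil, List.length_nil, Nat.sub_zero,
        List.take_length, List.append_nil, Nat.cast_zero, sub_zero] at h0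
      rw [PySem.List.len_eq, pvRevRange_eq, h0]
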